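-- pv_equiv track=rewrite | github.com/martinvonk/pyemu | pyemu/pst/result_handler.py | parse_iter_from_tag
-- ===== SOURCE A (Python) =====
-- def parse_iter_from_tag(tag):
--     rtag = tag[::-1]
--     digits = []
--     for d in rtag:
--         if str.isalpha(d):
--             break
--         digits.append(d)
--     if len(digits) == 0:
--         return None
--     digits = digits[::-1]
--     #itr = int(''.join(digits))
--     itr = ''.join(digits)
--     return itr
-- ===== SOURCE B (Python) =====
-- def parse_iter_from_tag(tag):
--     split = 0
--     for i, ch in enumerate(tag):
--         if ch.isalpha():
--             split = i + 1
--     result = tag[split:]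
--     return result if result else None
-- ===== Notes on version B (the rewrite author's own statement) =====
-- stated objective: simpler
-- what changed: Forward pass tracking the index just past the last alphabetic character, then one slice, instead of reversing the string, accumulating non-alpha characters into a list until the first alpha, and reversing again.
import Mathlib
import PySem

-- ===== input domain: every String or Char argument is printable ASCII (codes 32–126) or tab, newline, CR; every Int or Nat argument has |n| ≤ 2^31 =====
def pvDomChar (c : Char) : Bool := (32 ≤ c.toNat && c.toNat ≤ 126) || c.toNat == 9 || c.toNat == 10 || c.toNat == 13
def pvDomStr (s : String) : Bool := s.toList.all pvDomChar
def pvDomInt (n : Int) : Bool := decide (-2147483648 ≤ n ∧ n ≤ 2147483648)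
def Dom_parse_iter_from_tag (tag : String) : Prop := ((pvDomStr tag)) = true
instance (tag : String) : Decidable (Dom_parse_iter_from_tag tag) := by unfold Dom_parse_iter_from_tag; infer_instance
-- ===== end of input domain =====

-- B replaces A's reverse-accumulate-reverse scan by a forward pass that tracks the
-- index just past the last alphabetic character and takes one trailing slice (simpler).

-- ===== PORT A =====
-- loop 'for d in rtag: if str.isalpha(d): break; digits.append(d)'
def pvALoop (l : List Char) (digits : List Char) : List Char :=
  match l with
  | [] => digits
  | c :: rest => if PySem.Chars.isalpha c then digits else pvALoop rest (digits ++ [c])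

def parse_iter_from_tag (tag : String) : Option String :=
  let rtag := tag.toList.reverse          -- tag[::-1]
  let digits := pvALoop rtag []
  if digits.length = 0 then none
  else some (String.ofList digits.reverse)    -- ''.join(digits[::-1])

-- ===== PORT B =====
-- loop 'for i, ch in enumerate(tag): if ch.isalpha(): split = i + 1'
def pvBLoop (l : List Char) (i : Nat) (split : Nat) : Nat :=
  match l with
  | [] => split
  | c :: rest => pvBLoop rest (i + 1) (if PySem.Chars.isalpha c then i + 1 else split)

def parse_iter_from_tag_alt (tag : String) : Option String :=
  let cs := tag.toList
  let split := pvBLoop cs 0 0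
  let result := cs.drop split             -- tag[split:], 0 ≤ split ≤ len(tag)
  if result.isEmpty then none else some (String.ofList result)

-- ===== PRECONDITION & SPEC =====
def Spec_parse_iter_from_tag (tag : String) (out : Option String) : Prop := out = parse_iter_from_tag_alt tag
instance (tag : String) (out : Option String) : Decidable (Spec_parse_iter_from_tag tag out) := by unfold Spec_parse_iter_from_tag; infer_instance

-- ===== CLAIM (what is proved, stated in full; the proofs are below) =====
def Claim_equal_parse_iter_from_tag : Prop := ∀ (tag : String), Dom_parse_iter_from_tag tag → Spec_parse_iter_from_tag tag (parse_iter_from_tag tag)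

-- ===== LEMMAS AND PROOFS =====
theorem pvALoop_eq_takeWhile (l acc : List Char) :
    pvALoop l acc = acc ++ l.takeWhile (fun c => !PySem.Chars.isalpha c) := by
  induction l generalizing acc with
  | nil => simp [pvALoop]
  | cons c rest ih =>
    simp only [pvALoop, List.takeWhile]
    by_cases h : PySem.Chars.isalpha c <;> simp [h, ih]

theorem pvBLoop_le (l : List Char) (i s : Nat) (h : s ≤ i) : pvBLoop l i s ≤ i + l.length := by
  induction l generalizing i s with
  | nil => simpa [pvBLoop] using h
  | cons c rest ih =>
    simp only [pvBLoop, List.length_cons]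
    have := ih (i + 1) (if PySem.Chars.isalpha c then i + 1 else s)
      (by split <;> omega)
    omega

theorem pvBLoop_concat (cs : List Char) (c : Char) (i s : Nat) :
    pvBLoop (cs ++ [c]) i s =
      if PySem.Chars.isalpha c then i + cs.length + 1 else pvBLoop cs i s := by
  induction cs generalizing i s with
  | nil => simp [pvBLoop]
  | cons d rest ih =>
    simp only [List.cons_append, pvBLoop, ih, List.length_cons]
    split <;> omega

theorem pv_main (cs : List Char) :
    (cs.reverse.takeWhile (fun c => !PySem.Chars.isalpha c)).reverse =
      cs.drop (pvBLoop cs 0 0) := by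
  induction cs using List.reverseRecOn with
  | nil => simp [pvBLoop]
  | append_singleton cs c ih =>
    rw [pvBLoop_concat]
    by_cases h : PySem.Chars.isalpha c
    · simp [h]
    · have hle : pvBLoop cs 0 0 ≤ cs.length := by
        simpa using pvBLoop_le cs 0 0 (le_refl 0)
      have h' : PySem.Chars.isalpha c = false := by simpa using h
      rw [if_neg h]
      simp only [List.reverse_append, List.reverse_nil, List.nil_append,
        List.singleton_append, List.takeWhile_cons, h', Bool.not_false, if_true,
        List.reverse_cons, ih, List.drop_append_of_le_length hle]

-- ===== VERDICT (by name: the statement is the Claim_ definition above) =====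
theorem parse_iter_from_tag_spec : Claim_equal_parse_iter_from_tag := by
  intro tag _
  unfold Spec_parse_iter_from_tag parse_iter_from_tag parse_iter_from_tag_alt
  simp only [pvALoop_eq_takeWhile, List.nil_append]
  rw [← pv_main tag.toList]
  rcases h : (tag.toList.reverse.takeWhile (fun c => !PySem.Chars.isalpha c)) with _ | ⟨c, rest⟩
  · simp
  · simp
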